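-- pv_equiv track=rewrite | github.com/ben-tanen/ben-tanen.github.io | _env/notion_bridge/transforms.py | build_figure_include
-- ===== SOURCE A (Python) =====
-- def _quote_param(value: str) -> str:
--     """Quote a value for a Liquid include tag, choosing quotes to avoid escaping."""
--     if '"' in value:
--         return f"'{value}'"
--     return f'"{value}"'
--
-- def build_figure_include(src: str, params: dict[str, str]) -> str:
--     """Build a Jekyll {% include figure.html %} tag from params.
--
--     Only includes params that are explicitly set. Keeps generated markdown clean.
--     """
--     parts = [f'src="{src}"']
--     # Emit params in a stable order
--     param_order = ["alt", "caption", "link", "autolink", "width", "style"]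
--     for key in param_order:
--         if key in params:
--             parts.append(f'{key}={_quote_param(params[key])}')
--     # Any remaining params not in the standard order
--     for key, value in params.items():
--         if key not in param_order:
--             parts.append(f'{key}={_quote_param(value)}')
--
--     return '{%% include figure.html %s %%}' % " ".join(parts)
-- ===== SOURCE B (Python) =====
-- def build_figure_include(src: str, params: dict[str, str]) -> str:
--     """Build a Jekyll {% include figure.html %} tag from params.
--
--     One pass over params: each formatted entry is dropped into one of seven
--     buckets (its position in the standard order, or a trailing bucket), then
--     the buckets are concatenated.
--     """
--     param_order = ["alt", "caption", "link", "autolink", "width", "style"]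
--     buckets = [[] for _ in range(len(param_order) + 1)]
--     for key, value in params.items():
--         i = param_order.index(key) if key in param_order else len(param_order)
--         q = "'" if '"' in value else '"'
--         buckets[i].append(f"{key}={q}{value}{q}")
--     parts = [f'src="{src}"']
--     for bucket in buckets:
--         parts.extend(bucket)
--     return '{%% include figure.html %s %%}' % " ".join(parts)
-- ===== Notes on version B (the rewrite author's own statement) =====
-- stated objective: alternative
-- what changed: B replaces A's fixed-order probe loop over the six known parameter names plus a second leftover scan with a single pass over params that drops each formatted entry into one of seven order buckets and then concatenates the buckets; Pre_ excludes association lists with duplicate keys, which a Python dict can never hold, so their treatment under the list encoding is an artefact.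
import Mathlib
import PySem

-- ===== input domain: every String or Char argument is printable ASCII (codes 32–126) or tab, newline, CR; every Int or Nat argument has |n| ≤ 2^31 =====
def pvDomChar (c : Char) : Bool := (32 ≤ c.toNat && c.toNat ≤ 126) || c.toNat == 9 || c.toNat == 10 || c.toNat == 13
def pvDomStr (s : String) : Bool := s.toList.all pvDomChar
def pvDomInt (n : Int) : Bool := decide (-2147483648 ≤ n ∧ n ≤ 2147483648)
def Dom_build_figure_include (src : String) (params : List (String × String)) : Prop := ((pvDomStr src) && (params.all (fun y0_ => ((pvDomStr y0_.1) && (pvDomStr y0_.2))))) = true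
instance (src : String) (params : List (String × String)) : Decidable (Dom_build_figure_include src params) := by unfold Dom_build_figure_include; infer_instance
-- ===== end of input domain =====

-- B builds the same include tag by one pass over params into seven order buckets instead of A's fixed-order probe loop plus leftover scan (alternative decomposition, same cost).
-- ===== PORT A =====
-- A builds the include tag with a fixed-order probe loop over the six known
-- parameter names followed by a scan over the remaining params.
def pvOrder : List String := ["alt", "caption", "link", "autolink", "width", "style"]

def pv_quote_param (value : String) : String :=
  if PySem.Str.isIn "\"" value then "'" ++ value ++ "'" else "\"" ++ value ++ "\""

def build_figure_include (src : String) (params : List (String × String)) : String :=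
  let d := PySem.Dict.mk params
  let parts : List String := ["src=\"" ++ src ++ "\""]
  let parts := pvOrder.foldl (fun parts key =>
      match PySem.Dict.get? d key with
      | some v => parts ++ [key ++ "=" ++ pv_quote_param v]
      | none => parts) parts
  let parts := params.foldl (fun parts kv =>
      if pvOrder.contains kv.1 then parts
      else parts ++ [kv.1 ++ "=" ++ pv_quote_param kv.2]) parts
  "{% include figure.html " ++ PySem.Str.join " " parts ++ " %}"

-- ===== PORT B =====
-- B makes ONE pass over params, dropping each formatted entry into one of
-- seven buckets (position in pvOrder, or a trailing bucket), then concatenates.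
def pv_fmt (key value : String) : String :=
  let q := if PySem.Str.isIn "\"" value then "'" else "\""
  key ++ "=" ++ q ++ value ++ q

def build_figure_include_alt (src : String) (params : List (String × String)) : String :=
  let buckets : List (List String) := List.replicate (pvOrder.length + 1) []
  let buckets := params.foldl (fun bs kv =>
      let i := (PySem.List.index? pvOrder kv.1).getD pvOrder.length
      bs.set i (bs[i]! ++ [pv_fmt kv.1 kv.2])) buckets
  let parts := buckets.foldl (fun acc b => acc ++ b) ["src=\"" ++ src ++ "\""]
  "{% include figure.html " ++ PySem.Str.join " " parts ++ " %}"

-- ===== PRECONDITION & SPEC =====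
-- Pre_ excludes association lists with duplicate keys: a Python dict can never
-- hold them, so how the list-encoded ports treat them is an artefact of the encoding.
def Pre_build_figure_include (src : String) (params : List (String × String)) : Prop :=
  (params.map Prod.fst).Nodup
instance (src : String) (params : List (String × String)) : Decidable (Pre_build_figure_include src params) := by unfold Pre_build_figure_include; infer_instance
def pvWitness_build_figure_include : String × (List (String × String)) :=
  ("img.png", [("foo", "a\"b"), ("alt", "x")])
def Spec_build_figure_include (src : String) (params : List (String × String)) (out : String) : Prop := out = build_figure_include_alt src params
instance (src : String) (params : List (String × String)) (out : String) : Decidable (Spec_build_figure_include src params out) := by unfold Spec_build_figure_include; infer_instance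

-- ===== CLAIM (what is proved, stated in full; the proofs are below) =====
def Claim_equal_build_figure_include : Prop := ∀ (src : String) (params : List (String × String)), Dom_build_figure_include src params → Pre_build_figure_include src params → Spec_build_figure_include src params (build_figure_include src params)

-- ===== LEMMAS AND PROOFS =====
def pvIdx (k : String) : Nat := (PySem.List.index? pvOrder k).getD pvOrder.length

lemma pvIdx_eq (k : String) : pvIdx k =
    if "alt" = k then 0 else if "caption" = k then 1 else if "link" = k then 2
    else if "autolink" = k then 3 else if "width" = k then 4 else if "style" = k then 5 else 6 := by
  unfold pvIdx pvOrder
  rw [PySem.List.index?_eq_idxOf?]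
  simp only [List.idxOf?, List.findIdx?_cons, List.findIdx?_nil, beq_iff_eq]
  split_ifs <;> rfl

lemma pv_fmt_eq (k v : String) : pv_fmt k v = k ++ "=" ++ pv_quote_param v := by
  unfold pv_fmt pv_quote_param
  split_ifs <;> simp only [String.append_assoc]

lemma map_getElem!_range {α : Type} [Inhabited α] (l : List α) :
    (List.range l.length).map (fun j => l[j]!) = l := by
  apply List.ext_getElem
  · simp
  · intro i h1 h2
    simp [List.getElem!_eq_getElem?_getD, List.getElem?_eq_getElem h2]

lemma loop1_eq (d : PySem.Dict String String) (ks : List String) (ps : List String) :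
    ks.foldl (fun parts key =>
      match PySem.Dict.get? d key with
      | some v => parts ++ [key ++ "=" ++ pv_quote_param v]
      | none => parts) ps
    = ps ++ ks.flatMap (fun k =>
      match PySem.Dict.get? d k with
      | some v => [k ++ "=" ++ pv_quote_param v]
      | none => []) := by
  induction ks generalizing ps with
  | nil => simp
  | cons k t ih =>
    simp only [List.foldl_cons, List.flatMap_cons, ih]
    cases PySem.Dict.get? d k <;> simp

lemma loop2_eq (params : List (String × String)) (ps : List String) :
    params.foldl (fun parts kv =>
      if pvOrder.contains kv.1 then parts
      else parts ++ [kv.1 ++ "=" ++ pv_quote_param kv.2]) ps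
    = ps ++ (params.filter (fun kv => !pvOrder.contains kv.1)).map
        (fun kv => kv.1 ++ "=" ++ pv_quote_param kv.2) := by
  induction params generalizing ps with
  | nil => simp
  | cons kv t ih =>
    rw [List.foldl_cons, List.filter_cons]
    by_cases h : pvOrder.contains kv.1 = true
    · have h' : ¬ ((!pvOrder.contains kv.1) = true) := by rw [h]; simp
      rw [if_pos h, if_neg h']
      exact ih ps
    · have hb : pvOrder.contains kv.1 = false := by simpa using h
      have h' : (!pvOrder.contains kv.1) = true := by rw [hb]; rfl
      rw [if_neg h, if_pos h', ih]
      simp [List.append_assoc]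

lemma bucket_spec {α : Type} (g : α → Nat) (f : α → String) (l : List α)
    (bs : List (List String)) (hg : ∀ a ∈ l, g a < bs.length) :
    l.foldl (fun bs a => bs.set (g a) (bs[g a]! ++ [f a])) bs
      = (List.range bs.length).map
          (fun j => bs[j]! ++ (l.filter (fun a => g a == j)).map f) := by
  induction l generalizing bs with
  | nil => simpa using (map_getElem!_range bs).symm
  | cons a t ih =>
    have ha : g a < bs.length := hg a (by simp)
    simp only [List.foldl_cons]
    rw [ih _ (by intro x hx; simpa using hg x (List.mem_cons_of_mem _ hx))]
    apply List.ext_getElem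
    · simp
    · intro i h1 h2
      simp only [List.getElem_map, List.getElem_range] at h1 h2 ⊢
      have hi : i < bs.length := by simpa using h1
      have hset : (bs.set (g a) (bs[g a]! ++ [f a]))[i]! = if g a = i then bs[g a]! ++ [f a] else bs[i]! := by
        rw [List.getElem!_eq_getElem?_getD, List.getElem?_eq_getElem (by simpa using hi)]
        simp [List.getElem_set, List.getElem!_eq_getElem?_getD, List.getElem?_eq_getElem hi]
      rw [hset, List.filter_cons]
      by_cases h : g a = i
      · simp [h, List.append_assoc]
      · have : (g a == i) = false := by simpa using h
        simp [this, h]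

lemma filter_key_eq (k : String) (params : List (String × String))
    (h : (params.map Prod.fst).Nodup) :
    params.filter (fun kv => kv.1 == k)
      = (match PySem.Dict.get? (PySem.Dict.mk params) k with
         | some v => [(k, v)]
         | none => ([] : List (String × String))) := by
  induction params with
  | nil => simp [PySem.Dict.get?]
  | cons kv t ih =>
    obtain ⟨k', v'⟩ := kv
    simp only [List.map_cons, List.nodup_cons] at h
    rw [List.filter_cons, PySem.Dict.get?_mk_cons]
    by_cases hk : k' = k
    · subst hk
      have : t.filter (fun kv => kv.1 == k') = [] := by
        rw [List.filter_eq_nil_iff]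
        intro kv hkv
        simp only [beq_iff_eq]
        intro he
        exact h.1 (he ▸ List.mem_map_of_mem hkv)
      simp [this]
    · have hb : (k' == k) = false := by simpa using hk
      simp only [hb]
      simpa using ih h.2

lemma pvIdx_beq0 (s : String) : (pvIdx s == 0) = (s == "alt") := by
  rw [pvIdx_eq]; split_ifs <;> simp_all [beq_eq_false_iff_ne] <;> intro he <;> simp_all

lemma pvIdx_beq1 (s : String) : (pvIdx s == 1) = (s == "caption") := by
  rw [pvIdx_eq]; split_ifs <;> simp_all [beq_eq_false_iff_ne] <;> intro he <;> simp_all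

lemma pvIdx_beq2 (s : String) : (pvIdx s == 2) = (s == "link") := by
  rw [pvIdx_eq]; split_ifs <;> simp_all [beq_eq_false_iff_ne] <;> intro he <;> simp_all

lemma pvIdx_beq3 (s : String) : (pvIdx s == 3) = (s == "autolink") := by
  rw [pvIdx_eq]; split_ifs <;> simp_all [beq_eq_false_iff_ne] <;> intro he <;> simp_all

lemma pvIdx_beq4 (s : String) : (pvIdx s == 4) = (s == "width") := by
  rw [pvIdx_eq]; split_ifs <;> simp_all [beq_eq_false_iff_ne] <;> intro he <;> simp_all

lemma pvIdx_beq5 (s : String) : (pvIdx s == 5) = (s == "style") := by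
  rw [pvIdx_eq]; split_ifs <;> simp_all [beq_eq_false_iff_ne] <;> intro he <;> simp_all

lemma pvIdx_beq6 (s : String) : (pvIdx s == 6) = !pvOrder.contains s := by
  rw [pvIdx_eq]; split_ifs <;> simp_all [pvOrder] <;>
    first
      | (intro he; simp_all)
      | (refine ⟨?_, ?_, ?_, ?_, ?_, ?_⟩ <;> intro he <;> exact absurd he.symm (by assumption))

lemma known_bucket (k : String) (j : Nat) (params : List (String × String))
    (hpre : (params.map Prod.fst).Nodup)
    (hk : ∀ s : String, (pvIdx s == j) = (s == k)) :
    (params.filter (fun kv => pvIdx kv.1 == j)).map (fun kv => pv_fmt kv.1 kv.2)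
      = (match PySem.Dict.get? (PySem.Dict.mk params) k with
         | some v => [k ++ "=" ++ pv_quote_param v]
         | none => ([] : List String)) := by
  have h1 : params.filter (fun kv => pvIdx kv.1 == j) = params.filter (fun kv => kv.1 == k) :=
    List.filter_congr (fun a _ => hk a.1)
  rw [h1, filter_key_eq k params hpre]
  cases PySem.Dict.get? (PySem.Dict.mk params) k <;> simp [pv_fmt_eq]

lemma unknown_bucket (params : List (String × String)) :
    (params.filter (fun kv => pvIdx kv.1 == 6)).map (fun kv => pv_fmt kv.1 kv.2)
      = (params.filter (fun kv => !pvOrder.contains kv.1)).map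
          (fun kv => kv.1 ++ "=" ++ pv_quote_param kv.2) := by
  rw [List.filter_congr (fun (a : String × String) _ => pvIdx_beq6 a.1)]
  exact List.map_congr_left (fun a _ => pv_fmt_eq a.1 a.2)

lemma bucket_spec' (params : List (String × String)) :
    params.foldl (fun bs kv =>
        bs.set ((PySem.List.index? pvOrder kv.1).getD pvOrder.length)
          (bs[(PySem.List.index? pvOrder kv.1).getD pvOrder.length]! ++ [pv_fmt kv.1 kv.2]))
      (List.replicate (pvOrder.length + 1) [])
    = (List.range 7).map (fun j => (params.filter (fun kv => pvIdx kv.1 == j)).map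
        (fun kv => pv_fmt kv.1 kv.2)) := by
  have hb : ∀ kv ∈ params, pvIdx kv.1 < (List.replicate (pvOrder.length + 1) ([] : List String)).length := by
    intro kv _
    rw [List.length_replicate, pvIdx_eq]
    split_ifs <;> simp [pvOrder]
  have h := bucket_spec (fun kv : String × String => pvIdx kv.1)
    (fun kv => pv_fmt kv.1 kv.2) params (List.replicate (pvOrder.length + 1) []) hb
  simp only [pvIdx] at h
  rw [h]
  apply List.ext_getElem
  · simp [pvOrder]
  · intro i h1 h2
    simp only [List.length_map, List.length_range, List.length_replicate] at h1 h2
    have hi : i < pvOrder.length + 1 := h1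
    simp only [List.getElem_map, List.getElem_range]
    simp [hi, pvIdx]

-- ===== VERDICT (by name: the statement is the Claim_ definition above) =====
theorem build_figure_include_spec : Claim_equal_build_figure_include := by
  intro src params _hdom hpre
  unfold Spec_build_figure_include build_figure_include build_figure_include_alt
  dsimp only
  rw [loop1_eq, loop2_eq, bucket_spec', PySem.List.foldl_append_eq_flatten]
  have hlist :
      (["src=\"" ++ src ++ "\""] ++ pvOrder.flatMap (fun k =>
          match PySem.Dict.get? (PySem.Dict.mk params) k with
          | some v => [k ++ "=" ++ pv_quote_param v]
          | none => [])) ++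
        (params.filter (fun kv => !pvOrder.contains kv.1)).map
          (fun kv => kv.1 ++ "=" ++ pv_quote_param kv.2)
      = ["src=\"" ++ src ++ "\""] ++
          ((List.range 7).map (fun j => (params.filter (fun kv => pvIdx kv.1 == j)).map
            (fun kv => pv_fmt kv.1 kv.2))).flatten := by
    rw [show List.range 7 = [0, 1, 2, 3, 4, 5, 6] from rfl]
    simp only [List.map_cons, List.map_nil, List.flatten_cons, List.flatten_nil,
      pvOrder, List.flatMap_cons, List.flatMap_nil]
    rw [known_bucket "alt" 0 params hpre pvIdx_beq0,
        known_bucket "caption" 1 params hpre pvIdx_beq1,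
        known_bucket "link" 2 params hpre pvIdx_beq2,
        known_bucket "autolink" 3 params hpre pvIdx_beq3,
        known_bucket "width" 4 params hpre pvIdx_beq4,
        known_bucket "style" 5 params hpre pvIdx_beq5,
        unknown_bucket params]
    simp [List.append_assoc, pvOrder, List.mem_cons, Bool.not_or]
  rw [hlist]
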